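-- pv_equiv track=rewrite | github.com/jaramirez10/Muddbot-Senior-Design | Demos/drive_and_record.py | drifting
-- ===== SOURCE A (Python) =====
-- SUBTLE_STEER_ARR_LEN = 15 # array length
--
-- def drifting(lr_dists, lr_dists_num_elements):
--     if lr_dists_num_elements < SUBTLE_STEER_ARR_LEN:
--         return False
--     elif lr_dists[0] + 5 >= lr_dists[lr_dists_num_elements - 1]:
--         return False
--     else:
--         for i in range(lr_dists_num_elements - 1):
--             if lr_dists[i+1] < lr_dists[i]:
--                 return False
--         return True
-- ===== SOURCE B (Python) =====
-- SUBTLE_STEER_ARR_LEN = 15 # array length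
--
-- def drifting(lr_dists, lr_dists_num_elements):
--     if lr_dists_num_elements < SUBTLE_STEER_ARR_LEN:
--         return False
--     seg = lr_dists[:lr_dists_num_elements]
--     if seg[0] + 5 >= seg[-1]:
--         return False
--     return seg == sorted(seg)
-- ===== Notes on version B (the rewrite author's own statement) =====
-- stated objective: idiomatic
-- what changed: The explicit index loop scanning for a descent is replaced by slicing the first num elements once and comparing the slice with its sorted copy (seg == sorted(seg)), the idiomatic Python monotonicity test.
-- outside the precondition, e.g. on drifting([1, 2, 3], 15): A raises IndexError, B returns False
import Mathlib
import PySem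

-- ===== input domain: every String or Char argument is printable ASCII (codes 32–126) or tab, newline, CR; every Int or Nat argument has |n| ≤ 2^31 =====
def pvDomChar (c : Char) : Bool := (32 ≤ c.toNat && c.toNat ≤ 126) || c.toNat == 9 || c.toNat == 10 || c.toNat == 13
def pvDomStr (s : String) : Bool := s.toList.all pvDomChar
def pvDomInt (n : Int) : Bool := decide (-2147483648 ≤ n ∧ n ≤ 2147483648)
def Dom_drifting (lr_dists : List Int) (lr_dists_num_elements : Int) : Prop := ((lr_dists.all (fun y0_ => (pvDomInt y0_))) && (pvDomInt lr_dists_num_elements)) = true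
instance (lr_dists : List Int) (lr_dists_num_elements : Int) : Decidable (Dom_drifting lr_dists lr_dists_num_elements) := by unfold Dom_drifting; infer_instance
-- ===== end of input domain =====

-- B replaces A's descent-scanning index loop by slicing the first num elements and comparing
-- the slice with its sorted copy (seg == sorted(seg)) — a more idiomatic monotonicity test.


-- ===== PORT A =====
-- the for-loop: for i in range(num-1): if lr[i+1] < lr[i]: return False / return True
def driftingLoop (lr : List Int) : List Int → Bool
  | [] => true
  | i :: rest =>
    if PySem.List.pyGetD lr (i + 1) 0 < PySem.List.pyGetD lr i 0 then false
    else driftingLoop lr rest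

def drifting (lr_dists : List Int) (lr_dists_num_elements : Int) : Bool :=
  if lr_dists_num_elements < 15 then false
  else if PySem.List.pyGetD lr_dists 0 0 + 5 ≥ PySem.List.pyGetD lr_dists (lr_dists_num_elements - 1) 0 then false
  else driftingLoop lr_dists (PySem.List.pyRange 0 (lr_dists_num_elements - 1) 1)

-- ===== PORT B =====
def drifting_alt (lr_dists : List Int) (lr_dists_num_elements : Int) : Bool :=
  if lr_dists_num_elements < 15 then false
  else
    let seg := PySem.List.slice lr_dists none (some lr_dists_num_elements)
    if PySem.List.pyGetD seg 0 0 + 5 ≥ PySem.List.pyGetD seg (-1) 0 then false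
    else seg == PySem.List.sorted seg (fun x => x) false

-- ===== PRECONDITION & SPEC =====
-- Pre_ excludes only inputs where A raises IndexError (num ≥ 15 but num exceeds the list length).
def Pre_drifting (lr_dists : List Int) (lr_dists_num_elements : Int) : Prop :=
  lr_dists_num_elements < 15 ∨ lr_dists_num_elements ≤ lr_dists.length
instance (lr_dists : List Int) (lr_dists_num_elements : Int) : Decidable (Pre_drifting lr_dists lr_dists_num_elements) := by unfold Pre_drifting; infer_instance

def pvWitness_drifting : List Int × Int := ([0, 1, 2, 3, 4, 5, 6, 7, 8, 9, 10, 11, 12, 13, 14], 15)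

def Spec_drifting (lr_dists : List Int) (lr_dists_num_elements : Int) (out : Bool) : Prop := out = drifting_alt lr_dists lr_dists_num_elements
instance (lr_dists : List Int) (lr_dists_num_elements : Int) (out : Bool) : Decidable (Spec_drifting lr_dists lr_dists_num_elements out) := by unfold Spec_drifting; infer_instance

-- ===== CLAIM (what is proved, stated in full; the proofs are below) =====
def Claim_equal_drifting : Prop := ∀ (lr_dists : List Int) (lr_dists_num_elements : Int), Dom_drifting lr_dists lr_dists_num_elements → Pre_drifting lr_dists lr_dists_num_elements → Spec_drifting lr_dists lr_dists_num_elements (drifting lr_dists lr_dists_num_elements)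


-- ===== LEMMAS AND PROOFS =====

-- A's loop over an index list never returning early equals an `all`
theorem driftingLoop_eq_all (lr : List Int) (is : List Int) :
    driftingLoop lr is = is.all (fun i => !(PySem.List.pyGetD lr (i + 1) 0 < PySem.List.pyGetD lr i 0)) := by
  induction is with
  | nil => rfl
  | cons i rest ih =>
    simp only [driftingLoop, List.all_cons, ih]
    split_ifs with h <;> simp [h]

-- ===== VERDICT (by name: the statement is the Claim_ definition above) =====
theorem drifting_spec : Claim_equal_drifting := by
  intro lr num _ hpre
  unfold Spec_drifting drifting drifting_alt
  by_cases h15 : num < 15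
  · simp [h15]
  · simp only [if_neg h15]
    have hnum0 : (0:Int) ≤ num := by omega
    have hle : num ≤ (lr.length : Int) := by
      rcases hpre with h | h
      · omega
      · exact h
    have hlen : num.toNat ≤ lr.length := by omega
    have hpos : 0 < lr.length := by omega
    rw [PySem.List.slice_to lr hnum0]
    have hseglen : (lr.take num.toNat).length = num.toNat := by
      simp [List.length_take]; omega
    have hsegne : lr.take num.toNat ≠ [] := by
      intro h
      rw [h] at hseglen
      simp at hseglen
      omega
    have hg0 : PySem.List.pyGetD (lr.take num.toNat) 0 0 = PySem.List.pyGetD lr 0 0 := by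
      rw [PySem.List.pyGetD_eq_getElem (lr.take num.toNat) 0 (by omega) (by rw [hseglen]; omega),
          PySem.List.pyGetD_eq_getElem lr 0 (by omega) (by omega)]
      simp [List.getElem_take]
    have hgl : PySem.List.pyGetD (lr.take num.toNat) (-1) 0 = PySem.List.pyGetD lr (num - 1) 0 := by
      rw [PySem.List.pyGetD_neg_one _ _ hsegne,
          PySem.List.pyGetD_eq_getElem lr 0 (by omega) (by omega)]
      rw [List.getLast_eq_getElem]
      have h1 : (lr.take num.toNat)[(lr.take num.toNat).length - 1]'(by omega) =
          lr[(lr.take num.toNat).length - 1]'(by omega) := List.getElem_take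
      rw [h1]
      have hidx : (lr.take num.toNat).length - 1 = (num - 1).toNat := by omega
      simp only [hidx]
    rw [hg0, hgl]
    split_ifs with hguard
    · rfl
    · rw [driftingLoop_eq_all]
      apply Bool.eq_iff_iff.mpr
      rw [List.all_eq_true, beq_iff_eq]
      constructor
      · intro hall
        refine ((PySem.List.sorted_eq_self_of_pairwise (lr.take num.toNat) (fun x => x) ?_)).symm
        show (lr.take num.toNat).Pairwise (· ≤ ·)
        rw [← List.isChain_iff_pairwise, List.isChain_iff_getElem]
        intro j hj
        rw [hseglen] at hj
        have h1 : (lr.take num.toNat)[j]'(by rw [hseglen]; omega) = lr[j]'(by omega) := List.getElem_take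
        have h2 : (lr.take num.toNat)[j+1]'(by rw [hseglen]; omega) = lr[j+1]'(by omega) := List.getElem_take
        rw [h1, h2]
        have hmem : (j : Int) ∈ PySem.List.pyRange 0 (num - 1) 1 := by
          rw [PySem.List.mem_pyRange_one]
          constructor
          · omega
          · omega
        have := hall (j : Int) hmem
        rw [PySem.List.pyGetD_eq_getElem lr 0 (by omega) (by omega),
            PySem.List.pyGetD_eq_getElem lr 0 (by omega) (by omega)] at this
        have hcast1 : ((j:Int) + 1).toNat = j + 1 := by omega
        have hcast2 : ((j:Int)).toNat = j := by omega
        simp only [hcast1, hcast2] at this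
        exact not_lt.mp (by simpa using this)
      · intro hsorted i hi
        rw [PySem.List.mem_pyRange_one] at hi
        obtain ⟨hi0, hi1⟩ := hi
        have hpw0 := PySem.List.sorted_pairwise (lr.take num.toNat) (fun x => x)
        rw [← hsorted] at hpw0
        have hpw : (lr.take num.toNat).Pairwise (· ≤ ·) := hpw0
        rw [← List.isChain_iff_pairwise, List.isChain_iff_getElem] at hpw
        have hj : i.toNat + 1 < (lr.take num.toNat).length := by rw [hseglen]; omega
        have hadj := hpw i.toNat hj
        have h1 : (lr.take num.toNat)[i.toNat]'(by omega) = lr[i.toNat]'(by omega) := List.getElem_take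
        have h2 : (lr.take num.toNat)[i.toNat+1]'(by omega) = lr[i.toNat+1]'(by omega) := List.getElem_take
        rw [h1, h2] at hadj
        rw [PySem.List.pyGetD_eq_getElem lr 0 (by omega) (by omega),
            PySem.List.pyGetD_eq_getElem lr 0 (by omega) (by omega)]
        have hcast1 : (i + 1).toNat = i.toNat + 1 := by omega
        simp only [hcast1]
        simpa using not_lt.mpr hadj
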